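-- pv_equiv track=rewrite | github.com/imrnmzri/nwsmalaysia | check_location.py | infer_state
-- ===== SOURCE A (Python) =====
-- KNOWN_STATES = [
--     "Perlis", "Kedah", "Pulau Pinang", "Perak", "Kelantan", "Terengganu",
--     "Pahang", "Selangor", "WP Kuala Lumpur", "WP Putrajaya", "Negeri Sembilan",
--     "Melaka", "Johor", "Sarawak", "Sabah", "WP Labuan",
-- ]
--
-- def infer_state(loc_id, name):
--     # Check if a state name appears in the location name
--     for state in sorted(KNOWN_STATES, key=len, reverse=True):
--         if state.lower() in name.lower():
--             return state
--     # Infer from ID prefix ranges (Dv = Sarawak/Sabah/Labuan, St = itself)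
--     prefix = loc_id[:2]
--     if prefix == "Dv":
--         return "Sarawak"  # best guess for unknown divisions
--     return ""
-- ===== SOURCE B (Python) =====
-- KNOWN_STATES = [
--     "Perlis", "Kedah", "Pulau Pinang", "Perak", "Kelantan", "Terengganu",
--     "Pahang", "Selangor", "WP Kuala Lumpur", "WP Putrajaya", "Negeri Sembilan",
--     "Melaka", "Johor", "Sarawak", "Sabah", "WP Labuan",
-- ]
--
-- def infer_state(loc_id, name):
--     # Collect all states whose name occurs in the location name, keep the longest.
--     target = name.lower()
--     matches = [s for s in KNOWN_STATES if s.lower() in target]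
--     if matches:
--         return max(matches, key=len)
--     if loc_id[:2] == "Dv":
--         return "Sarawak"
--     return ""
-- ===== Notes on version B (the rewrite author's own statement) =====
-- stated objective: simpler
-- what changed: A sorts the 16 state names by length (descending) on every call and returns the first whose lowercase form occurs in the name; B drops the sort entirely, filters the original list for matching states and returns max(matches, key=len), whose first-maximal tie-break reproduces A's stable-sort order.
import Mathlib
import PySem

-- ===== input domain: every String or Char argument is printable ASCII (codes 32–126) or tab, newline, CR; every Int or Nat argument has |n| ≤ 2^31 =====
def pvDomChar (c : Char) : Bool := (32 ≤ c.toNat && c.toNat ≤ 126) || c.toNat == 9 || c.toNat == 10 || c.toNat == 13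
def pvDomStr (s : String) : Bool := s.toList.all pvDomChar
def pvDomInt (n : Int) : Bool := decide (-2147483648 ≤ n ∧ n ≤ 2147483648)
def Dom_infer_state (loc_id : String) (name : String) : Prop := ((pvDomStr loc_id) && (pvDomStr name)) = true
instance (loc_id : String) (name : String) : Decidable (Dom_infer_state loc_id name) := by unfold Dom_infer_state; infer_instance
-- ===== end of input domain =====

-- B replaces A's per-call sort-by-length-then-first-match scan by a filter of the original
-- list followed by a single longest-match selection (objective: simpler).

-- ===== PORT A =====
def KNOWN_STATES : List String :=
  ["Perlis", "Kedah", "Pulau Pinang", "Perak", "Kelantan", "Terengganu",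
   "Pahang", "Selangor", "WP Kuala Lumpur", "WP Putrajaya", "Negeri Sembilan",
   "Melaka", "Johor", "Sarawak", "Sabah", "WP Labuan"]

def infer_state (loc_id : String) (name : String) : String :=
  -- for state in sorted(KNOWN_STATES, key=len, reverse=True): if state.lower() in name.lower(): return state
  match (PySem.List.sorted KNOWN_STATES (fun s => PySem.Str.len s) true).find?
      (fun state => PySem.Str.isIn (PySem.Str.lower state) (PySem.Str.lower name)) with
  | some state => state
  | none =>
    -- prefix = loc_id[:2]; if prefix == "Dv": return "Sarawak"; return ""
    if PySem.Str.slice loc_id none (some 2) == "Dv" then "Sarawak" else ""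

-- ===== PORT B =====
def infer_state_alt (loc_id : String) (name : String) : String :=
  let target := PySem.Str.lower name
  let ms := KNOWN_STATES.filter (fun s => PySem.Str.isIn (PySem.Str.lower s) target)
  match PySem.List.max? ms (fun s => PySem.Str.len s) with
  | some s => s
  | none =>
    if PySem.Str.slice loc_id none (some 2) == "Dv" then "Sarawak" else ""

-- ===== PRECONDITION & SPEC =====
def Spec_infer_state (loc_id : String) (name : String) (out : String) : Prop := out = infer_state_alt loc_id name
instance (loc_id : String) (name : String) (out : String) : Decidable (Spec_infer_state loc_id name out) := by unfold Spec_infer_state; infer_instance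

-- ===== CLAIM (what is proved, stated in full; the proofs are below) =====
def Claim_equal_infer_state : Prop := ∀ (loc_id : String) (name : String), Dom_infer_state loc_id name → Spec_infer_state loc_id name (infer_state loc_id name)

-- ===== LEMMAS AND PROOFS =====

-- KNOWN_STATES stably sorted by length, descending (A's loop order), as a literal.
def SORTED_STATES : List String :=
  ["WP Kuala Lumpur", "Negeri Sembilan", "Pulau Pinang", "WP Putrajaya", "Terengganu",
   "WP Labuan", "Kelantan", "Selangor", "Sarawak", "Perlis", "Pahang", "Melaka",
   "Kedah", "Perak", "Johor", "Sabah"]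

theorem sorted_states_eq :
    PySem.List.sorted KNOWN_STATES (fun s => PySem.Str.len s) true = SORTED_STATES := by
  decide

-- The running-max fold step of Python's max(key=...).
def pvStep {a : Type} (key : a → Int) : Option a → a → Option a :=
  fun acc x => match acc with
    | none => some x
    | some m' => if key m' < key x then some x else some m'

-- If everything seen so far is strictly below M, the accumulator stays none or strictly below M.
theorem pvStepFold_lt {a : Type} (key : a → Int) (M : Int) :
    ∀ (l : List a) (acc : Option a),
      (∀ y ∈ l, key y < M) →
      (acc = none ∨ ∃ z, acc = some z ∧ key z < M) →
      (l.foldl (pvStep key) acc = none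
      ∨ ∃ z, l.foldl (pvStep key) acc = some z ∧ key z < M) := by
  intro l
  induction l with
  | nil => intro acc _ hacc; simpa using hacc
  | cons x t ih =>
    intro acc hl hacc
    simp only [List.foldl_cons]
    apply ih
    · intro y hy; exact hl y (List.mem_cons_of_mem _ hy)
    · rcases hacc with h | ⟨z, hz, hzlt⟩
      · subst h; exact Or.inr ⟨x, rfl, hl x List.mem_cons_self⟩
      · subst hz
        by_cases hc : key z < key x
        · exact Or.inr ⟨x, by simp [pvStep, hc], hl x List.mem_cons_self⟩
        · exact Or.inr ⟨z, by simp [pvStep, hc], hzlt⟩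

-- Once the fold holds m and nothing later strictly exceeds key m, it keeps m.
theorem pvStepFold_keep {a : Type} (key : a → Int) (m : a) :
    ∀ l : List a, (∀ y ∈ l, key y ≤ key m) →
      l.foldl (pvStep key) (some m) = some m := by
  intro l
  induction l with
  | nil => intro _; rfl
  | cons x t ih =>
    intro hl
    simp only [List.foldl_cons]
    rw [show pvStep key (some m) x = some m
        from by simp [pvStep, not_lt.mpr (hl x List.mem_cons_self)]]
    exact ih (fun y hy => hl y (List.mem_cons_of_mem _ hy))

-- Python max(key=...) over the filtered list returns the first maximal match.
theorem max?_first_max {a : Type} (key : a → Int) (p : a → Bool)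
    (pre post : List a) (m : a)
    (hm : p m = true)
    (hpre : ∀ y ∈ pre, p y = true → key y < key m)
    (hpost : ∀ y ∈ post, p y = true → key y ≤ key m) :
    PySem.List.max? ((pre ++ m :: post).filter p) key = some m := by
  have hdef : ∀ L : List a, PySem.List.max? L key = L.foldl (pvStep key) none := fun _ => rfl
  rw [hdef, List.filter_append, List.filter_cons, if_pos hm, List.foldl_append, List.foldl_cons]
  have h1 := pvStepFold_lt key (key m) (pre.filter p) none
    (by intro y hy
        rcases List.mem_filter.mp hy with ⟨hy1, hy2⟩
        exact hpre y hy1 hy2)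
    (Or.inl rfl)
  have hkeep := pvStepFold_keep key m (post.filter p)
    (by intro y hy
        rcases List.mem_filter.mp hy with ⟨hy1, hy2⟩
        exact hpost y hy1 hy2)
  rcases h1 with h | ⟨z, hz, hzlt⟩
  · rw [h, show pvStep key none m = some m from rfl]; exact hkeep
  · rw [hz, show pvStep key (some z) m = some m from by simp [pvStep, hzlt]]
    exact hkeep

-- A's first match in length-descending order IS B's first longest match.
theorem find_eq_max (p : String → Bool) :
    SORTED_STATES.find? p
      = PySem.List.max? (KNOWN_STATES.filter p) (fun s => PySem.Str.len s) := by
  cases hWPKualaLumpur : p "WP Kuala Lumpur" with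
  | true =>
    have hf : SORTED_STATES.find? p = some "WP Kuala Lumpur" := by
      simp [SORTED_STATES, List.find?_cons_of_pos, List.find?_cons_of_neg, hWPKualaLumpur]
    rw [hf, show KNOWN_STATES = ["Perlis", "Kedah", "Pulau Pinang", "Perak", "Kelantan", "Terengganu", "Pahang", "Selangor"] ++ ("WP Kuala Lumpur" :: ["WP Putrajaya", "Negeri Sembilan", "Melaka", "Johor", "Sarawak", "Sabah", "WP Labuan"]) from rfl]
    exact (max?_first_max (fun s => PySem.Str.len s) p _ _ _ hWPKualaLumpur
      (by intro y hy hpy; fin_cases hy <;> first | decide | simp_all)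
      (by intro y hy hpy; fin_cases hy <;> first | decide | simp_all)).symm
  | false =>
  cases hNegeriSembilan : p "Negeri Sembilan" with
  | true =>
    have hf : SORTED_STATES.find? p = some "Negeri Sembilan" := by
      simp [SORTED_STATES, List.find?_cons_of_pos, List.find?_cons_of_neg, hWPKualaLumpur, hNegeriSembilan]
    rw [hf, show KNOWN_STATES = ["Perlis", "Kedah", "Pulau Pinang", "Perak", "Kelantan", "Terengganu", "Pahang", "Selangor", "WP Kuala Lumpur", "WP Putrajaya"] ++ ("Negeri Sembilan" :: ["Melaka", "Johor", "Sarawak", "Sabah", "WP Labuan"]) from rfl]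
    exact (max?_first_max (fun s => PySem.Str.len s) p _ _ _ hNegeriSembilan
      (by intro y hy hpy; fin_cases hy <;> first | decide | simp_all)
      (by intro y hy hpy; fin_cases hy <;> first | decide | simp_all)).symm
  | false =>
  cases hPulauPinang : p "Pulau Pinang" with
  | true =>
    have hf : SORTED_STATES.find? p = some "Pulau Pinang" := by
      simp [SORTED_STATES, List.find?_cons_of_pos, List.find?_cons_of_neg, hWPKualaLumpur, hNegeriSembilan, hPulauPinang]
    rw [hf, show KNOWN_STATES = ["Perlis", "Kedah"] ++ ("Pulau Pinang" :: ["Perak", "Kelantan", "Terengganu", "Pahang", "Selangor", "WP Kuala Lumpur", "WP Putrajaya", "Negeri Sembilan", "Melaka", "Johor", "Sarawak", "Sabah", "WP Labuan"]) from rfl]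
    exact (max?_first_max (fun s => PySem.Str.len s) p _ _ _ hPulauPinang
      (by intro y hy hpy; fin_cases hy <;> first | decide | simp_all)
      (by intro y hy hpy; fin_cases hy <;> first | decide | simp_all)).symm
  | false =>
  cases hWPPutrajaya : p "WP Putrajaya" with
  | true =>
    have hf : SORTED_STATES.find? p = some "WP Putrajaya" := by
      simp [SORTED_STATES, List.find?_cons_of_pos, List.find?_cons_of_neg, hWPKualaLumpur, hNegeriSembilan, hPulauPinang, hWPPutrajaya]
    rw [hf, show KNOWN_STATES = ["Perlis", "Kedah", "Pulau Pinang", "Perak", "Kelantan", "Terengganu", "Pahang", "Selangor", "WP Kuala Lumpur"] ++ ("WP Putrajaya" :: ["Negeri Sembilan", "Melaka", "Johor", "Sarawak", "Sabah", "WP Labuan"]) from rfl]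
    exact (max?_first_max (fun s => PySem.Str.len s) p _ _ _ hWPPutrajaya
      (by intro y hy hpy; fin_cases hy <;> first | decide | simp_all)
      (by intro y hy hpy; fin_cases hy <;> first | decide | simp_all)).symm
  | false =>
  cases hTerengganu : p "Terengganu" with
  | true =>
    have hf : SORTED_STATES.find? p = some "Terengganu" := by
      simp [SORTED_STATES, List.find?_cons_of_pos, List.find?_cons_of_neg, hWPKualaLumpur, hNegeriSembilan, hPulauPinang, hWPPutrajaya, hTerengganu]
    rw [hf, show KNOWN_STATES = ["Perlis", "Kedah", "Pulau Pinang", "Perak", "Kelantan"] ++ ("Terengganu" :: ["Pahang", "Selangor", "WP Kuala Lumpur", "WP Putrajaya", "Negeri Sembilan", "Melaka", "Johor", "Sarawak", "Sabah", "WP Labuan"]) from rfl]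
    exact (max?_first_max (fun s => PySem.Str.len s) p _ _ _ hTerengganu
      (by intro y hy hpy; fin_cases hy <;> first | decide | simp_all)
      (by intro y hy hpy; fin_cases hy <;> first | decide | simp_all)).symm
  | false =>
  cases hWPLabuan : p "WP Labuan" with
  | true =>
    have hf : SORTED_STATES.find? p = some "WP Labuan" := by
      simp [SORTED_STATES, List.find?_cons_of_pos, List.find?_cons_of_neg, hWPKualaLumpur, hNegeriSembilan, hPulauPinang, hWPPutrajaya, hTerengganu, hWPLabuan]
    rw [hf, show KNOWN_STATES = ["Perlis", "Kedah", "Pulau Pinang", "Perak", "Kelantan", "Terengganu", "Pahang", "Selangor", "WP Kuala Lumpur", "WP Putrajaya", "Negeri Sembilan", "Melaka", "Johor", "Sarawak", "Sabah"] ++ ("WP Labuan" :: []) from rfl]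
    exact (max?_first_max (fun s => PySem.Str.len s) p _ _ _ hWPLabuan
      (by intro y hy hpy; fin_cases hy <;> first | decide | simp_all)
      (by intro y hy hpy; fin_cases hy <;> first | decide | simp_all)).symm
  | false =>
  cases hKelantan : p "Kelantan" with
  | true =>
    have hf : SORTED_STATES.find? p = some "Kelantan" := by
      simp [SORTED_STATES, List.find?_cons_of_pos, List.find?_cons_of_neg, hWPKualaLumpur, hNegeriSembilan, hPulauPinang, hWPPutrajaya, hTerengganu, hWPLabuan, hKelantan]
    rw [hf, show KNOWN_STATES = ["Perlis", "Kedah", "Pulau Pinang", "Perak"] ++ ("Kelantan" :: ["Terengganu", "Pahang", "Selangor", "WP Kuala Lumpur", "WP Putrajaya", "Negeri Sembilan", "Melaka", "Johor", "Sarawak", "Sabah", "WP Labuan"]) from rfl]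
    exact (max?_first_max (fun s => PySem.Str.len s) p _ _ _ hKelantan
      (by intro y hy hpy; fin_cases hy <;> first | decide | simp_all)
      (by intro y hy hpy; fin_cases hy <;> first | decide | simp_all)).symm
  | false =>
  cases hSelangor : p "Selangor" with
  | true =>
    have hf : SORTED_STATES.find? p = some "Selangor" := by
      simp [SORTED_STATES, List.find?_cons_of_pos, List.find?_cons_of_neg, hWPKualaLumpur, hNegeriSembilan, hPulauPinang, hWPPutrajaya, hTerengganu, hWPLabuan, hKelantan, hSelangor]
    rw [hf, show KNOWN_STATES = ["Perlis", "Kedah", "Pulau Pinang", "Perak", "Kelantan", "Terengganu", "Pahang"] ++ ("Selangor" :: ["WP Kuala Lumpur", "WP Putrajaya", "Negeri Sembilan", "Melaka", "Johor", "Sarawak", "Sabah", "WP Labuan"]) from rfl]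
    exact (max?_first_max (fun s => PySem.Str.len s) p _ _ _ hSelangor
      (by intro y hy hpy; fin_cases hy <;> first | decide | simp_all)
      (by intro y hy hpy; fin_cases hy <;> first | decide | simp_all)).symm
  | false =>
  cases hSarawak : p "Sarawak" with
  | true =>
    have hf : SORTED_STATES.find? p = some "Sarawak" := by
      simp [SORTED_STATES, List.find?_cons_of_pos, List.find?_cons_of_neg, hWPKualaLumpur, hNegeriSembilan, hPulauPinang, hWPPutrajaya, hTerengganu, hWPLabuan, hKelantan, hSelangor, hSarawak]
    rw [hf, show KNOWN_STATES = ["Perlis", "Kedah", "Pulau Pinang", "Perak", "Kelantan", "Terengganu", "Pahang", "Selangor", "WP Kuala Lumpur", "WP Putrajaya", "Negeri Sembilan", "Melaka", "Johor"] ++ ("Sarawak" :: ["Sabah", "WP Labuan"]) from rfl]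
    exact (max?_first_max (fun s => PySem.Str.len s) p _ _ _ hSarawak
      (by intro y hy hpy; fin_cases hy <;> first | decide | simp_all)
      (by intro y hy hpy; fin_cases hy <;> first | decide | simp_all)).symm
  | false =>
  cases hPerlis : p "Perlis" with
  | true =>
    have hf : SORTED_STATES.find? p = some "Perlis" := by
      simp [SORTED_STATES, List.find?_cons_of_pos, List.find?_cons_of_neg, hWPKualaLumpur, hNegeriSembilan, hPulauPinang, hWPPutrajaya, hTerengganu, hWPLabuan, hKelantan, hSelangor, hSarawak, hPerlis]
    rw [hf, show KNOWN_STATES = [] ++ ("Perlis" :: ["Kedah", "Pulau Pinang", "Perak", "Kelantan", "Terengganu", "Pahang", "Selangor", "WP Kuala Lumpur", "WP Putrajaya", "Negeri Sembilan", "Melaka", "Johor", "Sarawak", "Sabah", "WP Labuan"]) from rfl]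
    exact (max?_first_max (fun s => PySem.Str.len s) p _ _ _ hPerlis
      (by intro y hy hpy; fin_cases hy <;> first | decide | simp_all)
      (by intro y hy hpy; fin_cases hy <;> first | decide | simp_all)).symm
  | false =>
  cases hPahang : p "Pahang" with
  | true =>
    have hf : SORTED_STATES.find? p = some "Pahang" := by
      simp [SORTED_STATES, List.find?_cons_of_pos, List.find?_cons_of_neg, hWPKualaLumpur, hNegeriSembilan, hPulauPinang, hWPPutrajaya, hTerengganu, hWPLabuan, hKelantan, hSelangor, hSarawak, hPerlis, hPahang]
    rw [hf, show KNOWN_STATES = ["Perlis", "Kedah", "Pulau Pinang", "Perak", "Kelantan", "Terengganu"] ++ ("Pahang" :: ["Selangor", "WP Kuala Lumpur", "WP Putrajaya", "Negeri Sembilan", "Melaka", "Johor", "Sarawak", "Sabah", "WP Labuan"]) from rfl]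
    exact (max?_first_max (fun s => PySem.Str.len s) p _ _ _ hPahang
      (by intro y hy hpy; fin_cases hy <;> first | decide | simp_all)
      (by intro y hy hpy; fin_cases hy <;> first | decide | simp_all)).symm
  | false =>
  cases hMelaka : p "Melaka" with
  | true =>
    have hf : SORTED_STATES.find? p = some "Melaka" := by
      simp [SORTED_STATES, List.find?_cons_of_pos, List.find?_cons_of_neg, hWPKualaLumpur, hNegeriSembilan, hPulauPinang, hWPPutrajaya, hTerengganu, hWPLabuan, hKelantan, hSelangor, hSarawak, hPerlis, hPahang, hMelaka]
    rw [hf, show KNOWN_STATES = ["Perlis", "Kedah", "Pulau Pinang", "Perak", "Kelantan", "Terengganu", "Pahang", "Selangor", "WP Kuala Lumpur", "WP Putrajaya", "Negeri Sembilan"] ++ ("Melaka" :: ["Johor", "Sarawak", "Sabah", "WP Labuan"]) from rfl]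
    exact (max?_first_max (fun s => PySem.Str.len s) p _ _ _ hMelaka
      (by intro y hy hpy; fin_cases hy <;> first | decide | simp_all)
      (by intro y hy hpy; fin_cases hy <;> first | decide | simp_all)).symm
  | false =>
  cases hKedah : p "Kedah" with
  | true =>
    have hf : SORTED_STATES.find? p = some "Kedah" := by
      simp [SORTED_STATES, List.find?_cons_of_pos, List.find?_cons_of_neg, hWPKualaLumpur, hNegeriSembilan, hPulauPinang, hWPPutrajaya, hTerengganu, hWPLabuan, hKelantan, hSelangor, hSarawak, hPerlis, hPahang, hMelaka, hKedah]
    rw [hf, show KNOWN_STATES = ["Perlis"] ++ ("Kedah" :: ["Pulau Pinang", "Perak", "Kelantan", "Terengganu", "Pahang", "Selangor", "WP Kuala Lumpur", "WP Putrajaya", "Negeri Sembilan", "Melaka", "Johor", "Sarawak", "Sabah", "WP Labuan"]) from rfl]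
    exact (max?_first_max (fun s => PySem.Str.len s) p _ _ _ hKedah
      (by intro y hy hpy; fin_cases hy <;> first | decide | simp_all)
      (by intro y hy hpy; fin_cases hy <;> first | decide | simp_all)).symm
  | false =>
  cases hPerak : p "Perak" with
  | true =>
    have hf : SORTED_STATES.find? p = some "Perak" := by
      simp [SORTED_STATES, List.find?_cons_of_pos, List.find?_cons_of_neg, hWPKualaLumpur, hNegeriSembilan, hPulauPinang, hWPPutrajaya, hTerengganu, hWPLabuan, hKelantan, hSelangor, hSarawak, hPerlis, hPahang, hMelaka, hKedah, hPerak]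
    rw [hf, show KNOWN_STATES = ["Perlis", "Kedah", "Pulau Pinang"] ++ ("Perak" :: ["Kelantan", "Terengganu", "Pahang", "Selangor", "WP Kuala Lumpur", "WP Putrajaya", "Negeri Sembilan", "Melaka", "Johor", "Sarawak", "Sabah", "WP Labuan"]) from rfl]
    exact (max?_first_max (fun s => PySem.Str.len s) p _ _ _ hPerak
      (by intro y hy hpy; fin_cases hy <;> first | decide | simp_all)
      (by intro y hy hpy; fin_cases hy <;> first | decide | simp_all)).symm
  | false =>
  cases hJohor : p "Johor" with
  | true =>
    have hf : SORTED_STATES.find? p = some "Johor" := by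
      simp [SORTED_STATES, List.find?_cons_of_pos, List.find?_cons_of_neg, hWPKualaLumpur, hNegeriSembilan, hPulauPinang, hWPPutrajaya, hTerengganu, hWPLabuan, hKelantan, hSelangor, hSarawak, hPerlis, hPahang, hMelaka, hKedah, hPerak, hJohor]
    rw [hf, show KNOWN_STATES = ["Perlis", "Kedah", "Pulau Pinang", "Perak", "Kelantan", "Terengganu", "Pahang", "Selangor", "WP Kuala Lumpur", "WP Putrajaya", "Negeri Sembilan", "Melaka"] ++ ("Johor" :: ["Sarawak", "Sabah", "WP Labuan"]) from rfl]
    exact (max?_first_max (fun s => PySem.Str.len s) p _ _ _ hJohor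
      (by intro y hy hpy; fin_cases hy <;> first | decide | simp_all)
      (by intro y hy hpy; fin_cases hy <;> first | decide | simp_all)).symm
  | false =>
  cases hSabah : p "Sabah" with
  | true =>
    have hf : SORTED_STATES.find? p = some "Sabah" := by
      simp [SORTED_STATES, List.find?_cons_of_pos, List.find?_cons_of_neg, hWPKualaLumpur, hNegeriSembilan, hPulauPinang, hWPPutrajaya, hTerengganu, hWPLabuan, hKelantan, hSelangor, hSarawak, hPerlis, hPahang, hMelaka, hKedah, hPerak, hJohor, hSabah]
    rw [hf, show KNOWN_STATES = ["Perlis", "Kedah", "Pulau Pinang", "Perak", "Kelantan", "Terengganu", "Pahang", "Selangor", "WP Kuala Lumpur", "WP Putrajaya", "Negeri Sembilan", "Melaka", "Johor", "Sarawak"] ++ ("Sabah" :: ["WP Labuan"]) from rfl]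
    exact (max?_first_max (fun s => PySem.Str.len s) p _ _ _ hSabah
      (by intro y hy hpy; fin_cases hy <;> first | decide | simp_all)
      (by intro y hy hpy; fin_cases hy <;> first | decide | simp_all)).symm
  | false =>
  have hf : SORTED_STATES.find? p = none := by
    simp [SORTED_STATES, List.find?_cons_of_neg, hWPKualaLumpur, hNegeriSembilan, hPulauPinang, hWPPutrajaya, hTerengganu, hWPLabuan, hKelantan, hSelangor, hSarawak, hPerlis, hPahang, hMelaka, hKedah, hPerak, hJohor, hSabah]
  have hg : KNOWN_STATES.filter p = [] := by
    simp [KNOWN_STATES, List.filter_cons, hWPKualaLumpur, hNegeriSembilan, hPulauPinang, hWPPutrajaya, hTerengganu, hWPLabuan, hKelantan, hSelangor, hSarawak, hPerlis, hPahang, hMelaka, hKedah, hPerak, hJohor, hSabah]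
  rw [hf, hg]; rfl

-- ===== VERDICT (by name: the statement is the Claim_ definition above) =====
theorem infer_state_spec : Claim_equal_infer_state := by
  intro loc_id name _
  show infer_state loc_id name = infer_state_alt loc_id name
  unfold infer_state infer_state_alt
  rw [sorted_states_eq, find_eq_max]
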